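-- pv_equiv track=rewrite | github.com/miliar/Code_Jam_Webscraper | solutions_python/Problem_201/2356.py | seat_visitors
-- ===== SOURCE A (Python) =====
-- import heapq
--
-- def updateHeapAndMap(h,m,size,countAdd):
--     if size in m:
--         m[size] = m[size] + countAdd
--     else:
--         heapq.heappush(h,-size)
--         m[size] = countAdd
--
-- def seat_visitors(N,K):
--     pl = K
--     h = []
--     m = {}
--     heapq.heappush(h,-N)
--     m[N] = 1
--     while pl > 0:
--         mx = -heapq.heappop(h)
--         count = m[mx]
--         del m[mx]
--         pl -= count
--         size = int(mx/2)
--         if mx % 2: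
--             updateHeapAndMap(h,m,size,count*2)
--             if pl <= 0:
--                 return (size,size)
--         else:
--             updateHeapAndMap(h,m,size,count)
--             updateHeapAndMap(h,m,size - 1,count)
--             if pl <= 0:
--                 return (size, size - 1)
-- ===== SOURCE B (Python) =====
-- def seat_visitors(N, K):
--     # Single dict gap-size -> count; pick the largest gap by scanning the keys
--     # (no heap, no push/pop bookkeeping), merge children counts, one return point.
--     m = {N: 1}
--     remaining = K
--     while remaining > 0:
--         mx = max(m)
--         c = m.pop(mx)
--         remaining -= c
--         half = int(mx / 2)
--         if mx % 2:
--             m[half] = m.get(half, 0) + 2 * c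
--         else:
--             m[half] = m.get(half, 0) + c
--             m[half - 1] = m.get(half - 1, 0) + c
--         if remaining <= 0:
--             return (half, half) if mx % 2 else (half, half - 1)
-- ===== Notes on version B (the rewrite author's own statement) =====
-- stated objective: simpler
-- what changed: Drops heapq and the updateHeapAndMap helper that kept a heap mirroring the dict's keys: B keeps only one dict from gap size to count, finds the current largest gap with a direct max() scan of the keys, merges children counts with dict.get, and returns from a single point after the parity branch.
import Mathlib
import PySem

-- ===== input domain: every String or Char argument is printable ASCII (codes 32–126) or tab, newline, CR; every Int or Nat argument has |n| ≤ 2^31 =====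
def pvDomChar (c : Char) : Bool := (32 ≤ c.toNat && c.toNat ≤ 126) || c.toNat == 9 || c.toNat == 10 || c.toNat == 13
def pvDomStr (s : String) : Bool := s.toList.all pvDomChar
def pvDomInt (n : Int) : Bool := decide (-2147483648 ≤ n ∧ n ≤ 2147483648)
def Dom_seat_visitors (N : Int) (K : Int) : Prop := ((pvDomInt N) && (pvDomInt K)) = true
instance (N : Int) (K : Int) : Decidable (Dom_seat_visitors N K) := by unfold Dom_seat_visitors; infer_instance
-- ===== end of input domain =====

-- B drops A's heap (and the helper mirroring it in the dict): it keeps one gap-size → count dict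
-- scanned with max() each round; same return value, simpler structure, no speed claim.

-- ===== PORT A =====
-- heapq is ported by its observable contract: heappush appends, heappop returns the least element
-- and removes it.  Exact here: the heap never holds duplicate values (it mirrors the dict's key
-- set), so the unspecified heap order among equal elements is never observed.
def pyHeappush (h : List Int) (x : Int) : List Int := h ++ [x]

def pyHeappop (h : List Int) : Int × List Int :=
  match PySem.List.min? h (fun x => x) with
  | some mn => (mn, h.erase mn)
  | none => (0, h)   -- heappop([]) raises IndexError; unreachable: the heap mirrors the nonempty dict

def updateHeapAndMap (h : List Int) (m : PySem.Dict Int Int) (size : Int) (countAdd : Int) :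
    List Int × PySem.Dict Int Int :=
  match m.get? size with
  | some v => (h, m.insert size (v + countAdd))
  | none   => (pyHeappush h (-size), m.insert size countAdd)

def seatLoopA : Nat → Int → List Int → PySem.Dict Int Int → Int × Int
  | 0, _, _, _ => (0, 0)          -- fuel exhaustion: unreachable, the loop runs at most K rounds
  | fuel + 1, pl, h, m =>
    if 0 < pl then
      let p := pyHeappop h
      let mx := -p.1
      let count := m.getD mx 0          -- m[mx]; exact: the key is always present (heap mirrors keys)
      let m1 := m.erase mx
      let pl1 := pl - count
      let size := PySem.Int.truncdiv mx 2   -- int(mx/2); exact for |mx| ≤ 2^31 (float division exact below 2^53)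
      if PySem.Int.mod mx 2 ≠ 0 then
        let hm := updateHeapAndMap p.2 m1 size (count * 2)
        if pl1 ≤ 0 then (size, size) else seatLoopA fuel pl1 hm.1 hm.2
      else
        let hm := updateHeapAndMap p.2 m1 size count
        let hm2 := updateHeapAndMap hm.1 hm.2 (size - 1) count
        if pl1 ≤ 0 then (size, size - 1) else seatLoopA fuel pl1 hm2.1 hm2.2
    else (0, 0)                   -- while falls through: Python returns None; excluded by Pre_

def seat_visitors (N : Int) (K : Int) : Int × Int :=
  seatLoopA K.toNat K (pyHeappush [] (-N)) ((PySem.Dict.empty).insert N 1)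

-- ===== PORT B =====
def bump (m : PySem.Dict Int Int) (k : Int) (c : Int) : PySem.Dict Int Int :=
  m.insert k (m.getD k 0 + c)            -- m[k] = m.get(k, 0) + c

def seatLoopB : Nat → Int → PySem.Dict Int Int → Int × Int
  | 0, _, _ => (0, 0)
  | fuel + 1, rem, m =>
    if 0 < rem then
      match PySem.List.max? m.keys (fun x => x) with   -- max(m) iterates the dict's keys
      | none => (0, 0)       -- max() of an empty dict raises ValueError; unreachable
      | some mx =>
        let c := m.getD mx 0                  -- m.pop(mx); the key is present
        let m1 := m.erase mx
        let rem1 := rem - c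
        let half := PySem.Int.truncdiv mx 2   -- int(mx/2); exact for |mx| ≤ 2^31
        let m2 := if PySem.Int.mod mx 2 ≠ 0 then bump m1 half (2 * c)
                  else bump (bump m1 half c) (half - 1) c
        if rem1 ≤ 0 then
          (if PySem.Int.mod mx 2 ≠ 0 then (half, half) else (half, half - 1))
        else seatLoopB fuel rem1 m2
    else (0, 0)

def seat_visitors_alt (N : Int) (K : Int) : Int × Int :=
  seatLoopB K.toNat K ((PySem.Dict.empty).insert N 1)

-- ===== PRECONDITION & SPEC =====
-- Pre_ excludes K ≤ 0, where Python A's while loop never runs and it returns None (no Int pair).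
def Pre_seat_visitors (N : Int) (K : Int) : Prop := 1 ≤ K
instance (N : Int) (K : Int) : Decidable (Pre_seat_visitors N K) := by unfold Pre_seat_visitors; infer_instance
def pvWitness_seat_visitors : Int × Int := (4, 2)

def Spec_seat_visitors (N : Int) (K : Int) (out : Int × Int) : Prop := out = seat_visitors_alt N K
instance (N : Int) (K : Int) (out : Int × Int) : Decidable (Spec_seat_visitors N K out) := by unfold Spec_seat_visitors; infer_instance

-- ===== CLAIM (what is proved, stated in full; the proofs are below) =====
def Claim_equal_seat_visitors : Prop := ∀ (N : Int) (K : Int), Dom_seat_visitors N K → Pre_seat_visitors N K → Spec_seat_visitors N K (seat_visitors N K)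

-- ===== LEMMAS AND PROOFS =====

lemma getD_pos_of_mem_keys (m : PySem.Dict Int Int) (k : Int)
    (hv : ∀ v ∈ m.values, 1 ≤ v) (hk : k ∈ m.keys) : 1 ≤ m.getD k 0 := by
  cases hg : m.get? k with
  | none => exact absurd hk ((PySem.Dict.get?_eq_none_iff_not_mem_keys m k).mp hg)
  | some v =>
    rw [PySem.Dict.getD_of_get?_eq_some m 0 hg]
    exact hv v (List.mem_map_of_mem (PySem.Dict.mem_items_of_get?_eq_some _ hg))

lemma getD_zero_nonneg (m : PySem.Dict Int Int) (k : Int)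
    (hv : ∀ v ∈ m.values, 1 ≤ v) : 0 ≤ m.getD k 0 := by
  cases hg : m.get? k with
  | none => rw [PySem.Dict.getD_of_get?_eq_none m 0 hg]
  | some v =>
    rw [PySem.Dict.getD_of_get?_eq_some m 0 hg]
    exact le_trans (by norm_num)
      (hv v (List.mem_map_of_mem (PySem.Dict.mem_items_of_get?_eq_some _ hg)))

lemma bump_keys (m : PySem.Dict Int Int) (k c : Int) :
    (bump m k c).keys = if m.contains k then m.keys else m.keys ++ [k] := by
  unfold bump
  cases hc : m.contains k with
  | true => simp [PySem.Dict.keys_insert_of_contains _ _ hc]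
  | false => simp [PySem.Dict.keys_insert_of_not_contains _ _ hc]

lemma bump_nodup (m : PySem.Dict Int Int) (k c : Int) (hn : m.keys.Nodup) :
    (bump m k c).keys.Nodup := by
  exact PySem.Dict.nodup_keys_insert _ _ _ hn

lemma bump_keys_ne_nil (m : PySem.Dict Int Int) (k c : Int) : (bump m k c).keys ≠ [] := by
  exact List.ne_nil_of_mem ((PySem.Dict.mem_keys_insert _ _ _ _).mpr (Or.inl rfl))

lemma bump_values_ge (m : PySem.Dict Int Int) (k c : Int)
    (hv : ∀ v ∈ m.values, 1 ≤ v) (hc : 1 ≤ c) : ∀ v ∈ (bump m k c).values, 1 ≤ v := by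
  intro v hvv
  rcases PySem.Dict.mem_values_insert _ _ _ _ hvv with h | h
  · have := getD_zero_nonneg m k hv
    omega
  · exact hv v h

lemma upd_snd (h : List Int) (m : PySem.Dict Int Int) (s c : Int) :
    (updateHeapAndMap h m s c).2 = bump m s c := by
  unfold updateHeapAndMap bump
  cases hg : m.get? s with
  | none => rw [PySem.Dict.getD_of_get?_eq_none m 0 hg, zero_add]
  | some v => rw [PySem.Dict.getD_of_get?_eq_some m 0 hg]

lemma upd_fst (h : List Int) (m : PySem.Dict Int Int) (s c : Int) :
    (updateHeapAndMap h m s c).1 = if m.contains s then h else h ++ [-s] := by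
  unfold updateHeapAndMap pyHeappush
  rw [PySem.Dict.contains_eq_isSome_get?]
  cases hg : m.get? s <;> simp

lemma upd_heap_inv (h : List Int) (m : PySem.Dict Int Int) (s c : Int)
    (hh : h = m.keys.map (fun k => -k)) :
    (updateHeapAndMap h m s c).1 = ((updateHeapAndMap h m s c).2).keys.map (fun k => -k) := by
  rw [upd_fst, upd_snd, bump_keys]
  cases hc : m.contains s with
  | true => simp [hh]
  | false => simp [hh]

lemma min_neg_of_max (l : List Int) (mx : Int)
    (hmx : PySem.List.max? l (fun x => x) = some mx) :
    PySem.List.min? (l.map (fun k => -k)) (fun x => x) = some (-mx) := by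
  have hne : l ≠ [] := by
    intro h; rw [h] at hmx; simp [PySem.List.max?] at hmx
  cases hmn : PySem.List.min? (l.map (fun k => -k)) (fun x => x) with
  | none =>
    rw [PySem.List.min?_eq_none_iff] at hmn
    exact absurd (List.map_eq_nil_iff.mp hmn) hne
  | some mn =>
    obtain ⟨a, ha, rfl⟩ := List.mem_map.mp (PySem.List.min?_mem hmn)
    have h1 : a ≤ mx := PySem.List.max?_isMax hmx a ha
    have h2 : -a ≤ -mx :=
      PySem.List.min?_isMin hmn (-mx) (List.mem_map_of_mem (PySem.List.max?_mem hmx))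
    congr 1
    omega

lemma keys_erase_eq_filter (m : PySem.Dict Int Int) (k : Int) :
    (m.erase k).keys = m.keys.filter (fun x => !(x == k)) := by
  simp only [PySem.Dict.erase, PySem.Dict.keys, List.filter_map]
  rfl

lemma values_erase_sub (m : PySem.Dict Int Int) (k : Int) :
    ∀ v ∈ (m.erase k).values, v ∈ m.values := by
  intro v hv
  simp only [PySem.Dict.erase, PySem.Dict.values, List.mem_map] at hv ⊢
  obtain ⟨p, hp, rfl⟩ := hv
  exact ⟨p, (List.mem_filter.mp hp).1, rfl⟩

lemma heap_erase (l : List Int) (k : Int) (hn : l.Nodup) :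
    (l.map (fun x => -x)).erase (-k) = (l.filter (fun x => !(x == k))).map (fun x => -x) := by
  have hmn : (l.map (fun x => -x)).Nodup := hn.map (fun a b => by omega)
  rw [hmn.erase_eq_filter, List.filter_map]
  congr 1
  apply List.filter_congr
  intro x _
  simp [bne, neg_inj]

lemma loopAB (fuel : Nat) : ∀ (pl : Int) (h : List Int) (m : PySem.Dict Int Int),
    h = m.keys.map (fun k => -k) → m.keys.Nodup → (∀ v ∈ m.values, 1 ≤ v) → m.keys ≠ [] →
    pl ≤ (fuel : Int) →
    seatLoopA fuel pl h m = seatLoopB fuel pl m := by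
  induction fuel with
  | zero => intro pl h m _ _ _ _ _; rfl
  | succ fuel ih =>
    intro pl h m hh hn hv hne hpl
    by_cases hpl0 : 0 < pl
    · cases hmx : PySem.List.max? m.keys (fun x => x) with
      | none => exact absurd ((PySem.List.max?_eq_none_iff _ _).mp hmx) hne
      | some mx =>
        have hmin : PySem.List.min? h (fun x => x) = some (-mx) := by
          rw [hh]; exact min_neg_of_max _ _ hmx
        have hmem : mx ∈ m.keys := PySem.List.max?_mem hmx
        have hcnt : 1 ≤ m.getD mx 0 := getD_pos_of_mem_keys m mx hv hmem
        have h1h : h.erase (-mx) = (m.erase mx).keys.map (fun k => -k) := by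
          rw [hh, heap_erase _ _ hn, keys_erase_eq_filter]
        have hn1 : (m.erase mx).keys.Nodup := by
          rw [keys_erase_eq_filter]; exact hn.filter _
        have hv1 : ∀ v ∈ (m.erase mx).values, 1 ≤ v :=
          fun v hv' => hv v (values_erase_sub m mx v hv')
        have hfuel : pl - m.getD mx 0 ≤ (fuel : Int) := by push_cast at hpl ⊢; omega
        simp only [seatLoopA, seatLoopB, pyHeappop, hmin, hmx, if_pos hpl0, neg_neg]
        rw [Int.mul_comm (m.getD mx 0) 2]
        rw [upd_snd, upd_snd, upd_snd]
        by_cases hodd : PySem.Int.mod mx 2 ≠ 0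
        · simp only [if_pos hodd]
          by_cases hle : pl - m.getD mx 0 ≤ 0
          · simp only [if_pos hle]
          · simp only [if_neg hle]
            apply ih
            · rw [← upd_snd (h.erase (-mx)) (m.erase mx) (PySem.Int.truncdiv mx 2) (2 * m.getD mx 0)]
              exact upd_heap_inv _ _ _ _ h1h
            · exact bump_nodup _ _ _ hn1
            · exact bump_values_ge _ _ _ hv1 (by omega)
            · exact bump_keys_ne_nil _ _ _
            · exact hfuel
        · simp only [if_neg hodd]
          by_cases hle : pl - m.getD mx 0 ≤ 0
          · simp only [if_pos hle]
          · simp only [if_neg hle]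
            apply ih
            · rw [← upd_snd (updateHeapAndMap (h.erase (-mx)) (m.erase mx) (PySem.Int.truncdiv mx 2) (m.getD mx 0)).1
                    (bump (m.erase mx) (PySem.Int.truncdiv mx 2) (m.getD mx 0)) (PySem.Int.truncdiv mx 2 - 1) (m.getD mx 0)]
              apply upd_heap_inv
              rw [← upd_snd (h.erase (-mx)) (m.erase mx) (PySem.Int.truncdiv mx 2) (m.getD mx 0)]
              exact upd_heap_inv _ _ _ _ h1h
            · exact bump_nodup _ _ _ (bump_nodup _ _ _ hn1)
            · exact bump_values_ge _ _ _ (bump_values_ge _ _ _ hv1 (by omega)) (by omega)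
            · exact bump_keys_ne_nil _ _ _
            · exact hfuel
    · simp only [seatLoopA, seatLoopB, if_neg hpl0]

-- ===== VERDICT (by name: the statement is the Claim_ definition above) =====
theorem seat_visitors_spec : Claim_equal_seat_visitors := by
  intro N K _dom _pre
  unfold Spec_seat_visitors seat_visitors seat_visitors_alt
  have hd0 : ((PySem.Dict.empty).insert N 1 : PySem.Dict Int Int) = ⟨[(N, 1)]⟩ := rfl
  apply loopAB
  · rw [hd0]; rfl
  · rw [hd0]; simp [PySem.Dict.keys]
  · rw [hd0]; intro v hv; simp [PySem.Dict.values] at hv; omega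
  · rw [hd0]; simp [PySem.Dict.keys]
  · exact Int.self_le_toNat K
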